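-- pv_equiv track=rewrite | github.com/persevere67/graduation_project | preprocess/preprocess_behavior_noniid.py | pad_groups
-- ===== SOURCE A (Python) =====
-- def pad_groups(category_to_users, num_clients):
--     ordered = sorted(category_to_users.items(), key=lambda item: len(item[1]), reverse=True)
--     client_user_groups = [[] for _ in range(num_clients)]
--     client_sizes = [0 for _ in range(num_clients)]
--
--     for _, users in ordered:
--         target_idx = client_sizes.index(min(client_sizes))
--         client_user_groups[target_idx].extend(users)
--         client_sizes[target_idx] += len(users)
--
--     return client_user_groups
-- ===== SOURCE B (Python) =====
-- def pad_groups(category_to_users, num_clients):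
--     ordered = sorted(category_to_users.items(), key=lambda kv: len(kv[1]), reverse=True)
--     groups = [[] for _ in range(num_clients)]
--     # ordered priority list of (load, client) pairs, ascending; the least-loaded
--     # client (smallest index on ties) is always pairs[0]
--     pairs = [(0, i) for i in range(num_clients)]
--     for _, users in ordered:
--         load, idx = pairs[0]
--         groups[idx].extend(users)
--         entry = (load + len(users), idx)
--         rest = pairs[1:]
--         lo, hi = 0, len(rest)          # binary search for entry's slot
--         while lo < hi:
--             mid = (lo + hi) // 2
--             if rest[mid] < entry:
--                 lo = mid + 1
--             else:
--                 hi = mid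
--         rest.insert(lo, entry)
--         pairs = rest
--     return groups
-- ===== Notes on version B (the rewrite author's own statement) =====
-- stated objective: faster
-- what changed: Instead of rescanning all client loads with min() plus list.index() each round, B maintains an ascending priority list of (load, client) pairs whose head is always the least-loaded client (smallest index on ties) and re-inserts the updated pair by binary search.
import Mathlib
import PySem

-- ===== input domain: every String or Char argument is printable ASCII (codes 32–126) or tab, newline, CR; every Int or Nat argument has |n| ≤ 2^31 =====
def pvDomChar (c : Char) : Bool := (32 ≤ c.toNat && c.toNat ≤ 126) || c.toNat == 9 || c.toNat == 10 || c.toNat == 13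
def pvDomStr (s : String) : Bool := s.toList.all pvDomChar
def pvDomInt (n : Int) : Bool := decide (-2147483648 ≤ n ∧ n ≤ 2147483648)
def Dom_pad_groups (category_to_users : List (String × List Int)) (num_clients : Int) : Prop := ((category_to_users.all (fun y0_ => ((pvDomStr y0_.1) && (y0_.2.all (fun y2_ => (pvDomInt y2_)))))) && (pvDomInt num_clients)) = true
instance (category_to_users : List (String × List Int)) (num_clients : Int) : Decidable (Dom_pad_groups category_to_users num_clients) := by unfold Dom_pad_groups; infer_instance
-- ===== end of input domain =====

-- B replaces A's per-round min()+list.index() rescans of the load list by an ascending (load, client)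
-- priority list whose head is always the least-loaded client (smallest index on ties), re-inserting
-- the updated pair by binary search; measured faster by a constant factor.
-- A mutates nothing observable; the equivalence is about the return value.

-- ===== PORT A =====
def pvStepA (st : List (List Int) × List Int) (item : String × List Int) : List (List Int) × List Int :=
  match PySem.List.min? st.2 (fun x => x) with
  | none => st      -- unreachable under Pre_: min([]) raises ValueError in Python
  | some m =>
    match PySem.List.index? st.2 m with
    | none => st    -- unreachable: the minimum is a member of the list
    | some t =>
      (st.1.set t (st.1.getD t [] ++ item.2), st.2.set t (st.2.getD t 0 + item.2.length))

def pad_groups (category_to_users : List (String × List Int)) (num_clients : Int) : List (List Int) :=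
  let ordered := PySem.List.sorted (PySem.Dict.ofList category_to_users).items (fun item => (item.2.length : Int)) true
  let client_user_groups : List (List Int) := List.replicate num_clients.toNat []
  let client_sizes : List Int := List.replicate num_clients.toNat 0
  (ordered.foldl pvStepA (client_user_groups, client_sizes)).1

-- ===== PORT B =====
def pvLt (a b : Int × Int) : Bool := a.1 < b.1 || (a.1 == b.1 && a.2 < b.2)  -- Python tuple '<'

def pvBisect (rest : List (Int × Int)) (nw : Int × Int) (lo hi : Nat) : Nat :=
  if _h : lo < hi then
    let mid := (lo + hi) / 2
    if pvLt (rest.getD mid (0, 0)) nw then pvBisect rest nw (mid + 1) hi  -- rest[mid]: mid < len always, so getD is exact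
    else pvBisect rest nw lo mid
  else lo
termination_by hi - lo
decreasing_by all_goals omega

def pvStepB (st : List (List Int) × List (Int × Int)) (item : String × List Int) : List (List Int) × List (Int × Int) :=
  match st.2 with
  | [] => st        -- unreachable under Pre_: pairs[0] raises IndexError in Python
  | p :: rest =>
    let groups := st.1.set p.2.toNat (st.1.getD p.2.toNat [] ++ item.2)  -- p.2 ∈ [0, num_clients) always, so toNat is exact
    let nw : Int × Int := (p.1 + item.2.length, p.2)
    let lo := pvBisect rest nw 0 rest.length
    (groups, PySem.List.insert rest (lo : Int) nw)

def pad_groups_alt (category_to_users : List (String × List Int)) (num_clients : Int) : List (List Int) :=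
  let ordered := PySem.List.sorted (PySem.Dict.ofList category_to_users).items (fun item => (item.2.length : Int)) true
  let groups : List (List Int) := List.replicate num_clients.toNat []
  let pairs : List (Int × Int) := (PySem.List.pyRange 0 num_clients 1).map (fun i => (0, i))
  (ordered.foldl pvStepB (groups, pairs)).1

-- ===== PRECONDITION & SPEC =====
-- Pre_ excludes exactly the inputs where A raises: num_clients < 1 together with a nonempty dict
-- (A's min([]) raises ValueError there; B's pairs[0] raises IndexError there too).
def Pre_pad_groups (category_to_users : List (String × List Int)) (num_clients : Int) : Prop :=
  category_to_users = [] ∨ 1 ≤ num_clients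
instance (category_to_users : List (String × List Int)) (num_clients : Int) : Decidable (Pre_pad_groups category_to_users num_clients) := by unfold Pre_pad_groups; infer_instance

def pvWitness_pad_groups : (List (String × List Int)) × Int := ([("a", [1, 2]), ("b", [3])], 2)

def Spec_pad_groups (category_to_users : List (String × List Int)) (num_clients : Int) (out : List (List Int)) : Prop := out = pad_groups_alt category_to_users num_clients
instance (category_to_users : List (String × List Int)) (num_clients : Int) (out : List (List Int)) : Decidable (Spec_pad_groups category_to_users num_clients out) := by unfold Spec_pad_groups; infer_instance

-- ===== CLAIM (what is proved, stated in full; the proofs are below) =====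
def Claim_equal_pad_groups : Prop := ∀ (category_to_users : List (String × List Int)) (num_clients : Int), Dom_pad_groups category_to_users num_clients → Pre_pad_groups category_to_users num_clients → Spec_pad_groups category_to_users num_clients (pad_groups category_to_users num_clients)

-- ===== LEMMAS AND PROOFS =====

-- the multiset of (load, client) pairs B's priority list represents, relative to A's load list
def pvPairsOf (sizes : List Int) : List (Int × Int) :=
  (List.range sizes.length).map (fun j => (sizes.getD j 0, (j : Int)))

lemma pvLt_trans {a b c : Int × Int} (h1 : pvLt a b = true) (h2 : pvLt b c = true) : pvLt a c = true := by
  simp only [pvLt, Bool.or_eq_true, Bool.and_eq_true, decide_eq_true_eq, beq_iff_eq] at *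
  omega

lemma pvLt_total_of_ne {a b : Int × Int} (h : a ≠ b) : pvLt a b = true ∨ pvLt b a = true := by
  simp only [pvLt, Bool.or_eq_true, Bool.and_eq_true, decide_eq_true_eq, beq_iff_eq]
  by_cases h1 : a.1 = b.1
  · have h2 : a.2 ≠ b.2 := fun h2 => h (Prod.ext h1 h2)
    omega
  · omega

lemma pvGetD {α : Type} (l : List α) (d : α) {i : Nat} (h : i < l.length) : l.getD i d = l[i] :=
  List.getD_eq_getElem l d h

lemma length_pvPairsOf (sizes : List Int) : (pvPairsOf sizes).length = sizes.length := by
  simp [pvPairsOf]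

lemma getElem_pvPairsOf (sizes : List Int) (i : Nat) (h : i < (pvPairsOf sizes).length) :
    (pvPairsOf sizes)[i] = (sizes.getD i 0, (i : Int)) := by
  simp [pvPairsOf]

lemma mem_pvPairsOf {sizes : List Int} {p : Int × Int} (h : p ∈ pvPairsOf sizes) :
    ∃ j : Nat, j < sizes.length ∧ p = (sizes.getD j 0, (j : Int)) := by
  simpa [pvPairsOf, eq_comm] using h

lemma pvPairsOf_mem_of {sizes : List Int} {j : Nat} (hj : j < sizes.length) :
    (sizes.getD j 0, (j : Int)) ∈ pvPairsOf sizes := by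
  simp only [pvPairsOf, List.mem_map, List.mem_range]
  exact ⟨j, hj, rfl⟩

lemma pvPairsOf_split {sizes : List Int} {j : Nat} (hj : j < sizes.length) :
    pvPairsOf sizes =
      (pvPairsOf sizes).take j ++ (sizes.getD j 0, (j : Int)) :: (pvPairsOf sizes).drop (j + 1) := by
  have hj' : j < (pvPairsOf sizes).length := by rw [length_pvPairsOf]; exact hj
  conv_lhs => rw [← List.take_append_drop j (pvPairsOf sizes)]
  rw [List.drop_eq_getElem_cons hj', getElem_pvPairsOf]

lemma foldl_min_eq (tl : List Int) : ∀ (x m : Int), (m = x ∨ m ∈ tl) → m ≤ x →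
    (∀ y ∈ tl, m ≤ y) → tl.foldl min x = m := by
  induction tl with
  | nil =>
    intro x m h hx _
    rcases h with h | h
    · simp only [List.foldl_nil]; omega
    · simp at h
  | cons a tl ih =>
    intro x m h hx hall
    simp only [List.foldl_cons]
    have ha : m ≤ a := hall a (by simp)
    apply ih
    · rcases h with h | h
      · left; rw [h]; omega
      · rcases List.mem_cons.mp h with h | h
        · left; rw [h]; omega
        · right; exact h
    · omega
    · intro y hy; exact hall y (by simp [hy])

lemma min?_eq_of_min {sizes : List Int} {m : Int} (hmem : m ∈ sizes)
    (hmin : ∀ y ∈ sizes, m ≤ y) : PySem.List.min? sizes (fun x => x) = some m := by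
  cases sizes with
  | nil => simp at hmem
  | cons x tl =>
    rw [PySem.List.min?_id_cons]
    congr 1
    exact foldl_min_eq tl x m (by simpa [eq_comm] using List.mem_cons.mp hmem)
      (hmin x (by simp)) (fun y hy => hmin y (by simp [hy]))

lemma index?_eq_of_first {sizes : List Int} {m : Int} {j : Nat} (hj : j < sizes.length)
    (hv : sizes.getD j 0 = m) (hfirst : ∀ i, i < j → sizes.getD i 0 ≠ m) :
    PySem.List.index? sizes m = some j := by
  rw [PySem.List.index?_eq_some_iff]
  refine ⟨sizes.take j, sizes.drop (j + 1), ?_, by rw [List.length_take]; omega, ?_⟩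
  · have h2 : sizes[j] = m := by rw [← hv, pvGetD _ _ hj]
    conv_lhs => rw [← List.take_append_drop j sizes, List.drop_eq_getElem_cons hj, h2]
  · intro hm
    obtain ⟨i, hi, hie⟩ := List.mem_iff_getElem.mp hm
    have hi' := hi
    rw [List.length_take] at hi'
    have hil : i < sizes.length := by omega
    have hij : i < j := by omega
    apply hfirst i hij
    rw [List.getElem_take] at hie
    rw [pvGetD _ _ hil, hie]

lemma head_facts {sizes : List Int} {m t : Int} {rest : List (Int × Int)}
    (hperm : ((m, t) :: rest).Perm (pvPairsOf sizes))
    (hsort : ((m, t) :: rest).Pairwise (fun a b => pvLt a b = true)) :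
    ∃ j : Nat, (j : Int) = t ∧ j < sizes.length ∧ sizes.getD j 0 = m ∧
      PySem.List.min? sizes (fun x => x) = some m ∧
      PySem.List.index? sizes m = some j ∧
      rest.Perm ((pvPairsOf sizes).eraseIdx j) := by
  have hhead : ∀ b ∈ rest, pvLt (m, t) b = true := fun b hb => List.rel_of_pairwise_cons hsort hb
  have hmt : (m, t) ∈ pvPairsOf sizes := hperm.mem_iff.mp (by simp)
  obtain ⟨j, hj, hje⟩ := mem_pvPairsOf hmt
  have hv : sizes.getD j 0 = m := (congrArg Prod.fst hje).symm
  have hjt : (j : Int) = t := (congrArg Prod.snd hje).symm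
  have hmin : ∀ y ∈ sizes, m ≤ y := by
    intro y hy
    obtain ⟨i, hi, hie⟩ := List.mem_iff_getElem.mp hy
    have hmemy : (y, (i : Int)) ∈ pvPairsOf sizes := by
      have := pvPairsOf_mem_of hi
      rwa [pvGetD _ _ hi, hie] at this
    rcases List.mem_cons.mp (hperm.symm.mem_iff.mp hmemy) with h | h
    · exact le_of_eq (congrArg Prod.fst h).symm
    · have := hhead _ h
      simp only [pvLt, Bool.or_eq_true, Bool.and_eq_true, decide_eq_true_eq, beq_iff_eq] at this
      omega
  have hfirst : ∀ i, i < j → sizes.getD i 0 ≠ m := by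
    intro i hij heq
    have hil : i < sizes.length := by omega
    have hmemi : (m, (i : Int)) ∈ pvPairsOf sizes := by
      have := pvPairsOf_mem_of hil; rwa [heq] at this
    rcases List.mem_cons.mp (hperm.symm.mem_iff.mp hmemi) with h | h
    · have : (i : Int) = t := congrArg Prod.snd h
      omega
    · have := hhead _ h
      simp only [pvLt, Bool.or_eq_true, Bool.and_eq_true, decide_eq_true_eq, beq_iff_eq] at this
      omega
  refine ⟨j, hjt, hj, hv, min?_eq_of_min (by rw [← hv, pvGetD _ _ hj]; exact List.getElem_mem hj) hmin,
    index?_eq_of_first hj hv hfirst, ?_⟩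
  · have hsplit := pvPairsOf_split hj
    rw [hv, hjt] at hsplit
    have h1 : ((m, t) :: rest).Perm ((m, t) :: ((pvPairsOf sizes).take j ++ (pvPairsOf sizes).drop (j + 1))) := by
      refine hperm.trans ?_
      conv_lhs => rw [hsplit]
      exact List.perm_middle
    rw [List.eraseIdx_eq_take_drop_succ]
    exact h1.cons_inv

lemma pvBisect_spec (rest : List (Int × Int)) (nw : Int × Int)
    (hsorted : rest.Pairwise (fun a b => pvLt a b = true)) :
    ∀ (fuel lo hi : Nat), hi - lo ≤ fuel → lo ≤ hi → hi ≤ rest.length →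
    (∀ i, i < lo → pvLt (rest.getD i (0, 0)) nw = true) →
    (∀ i, hi ≤ i → i < rest.length → pvLt (rest.getD i (0, 0)) nw = false) →
    lo ≤ pvBisect rest nw lo hi ∧ pvBisect rest nw lo hi ≤ hi ∧
    (∀ i, i < pvBisect rest nw lo hi → pvLt (rest.getD i (0, 0)) nw = true) ∧
    (∀ i, pvBisect rest nw lo hi ≤ i → i < rest.length → pvLt (rest.getD i (0, 0)) nw = false) := by
  have hmono_lt : ∀ (i k : Nat), i ≤ k → k < rest.length →
      pvLt (rest.getD k (0, 0)) nw = true → pvLt (rest.getD i (0, 0)) nw = true := by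
    intro i k hik hk h
    rcases Nat.eq_or_lt_of_le hik with rfl | hlt
    · exact h
    · have hi : i < rest.length := by omega
      have := List.pairwise_iff_getElem.mp hsorted i k hi hk hlt
      rw [pvGetD _ _ hi]
      rw [pvGetD _ _ hk] at h
      exact pvLt_trans this h
  have hmono_ge : ∀ (k i : Nat), k ≤ i → i < rest.length →
      pvLt (rest.getD k (0, 0)) nw = false → pvLt (rest.getD i (0, 0)) nw = false := by
    intro k i hki hi h
    rcases Nat.eq_or_lt_of_le hki with rfl | hlt
    · exact h
    · have hk : k < rest.length := by omega
      by_contra hc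
      have hc' : pvLt (rest.getD i (0, 0)) nw = true := by
        cases h' : pvLt (rest.getD i (0, 0)) nw
        · exact absurd h' hc
        · rfl
      have := List.pairwise_iff_getElem.mp hsorted k i hk hi hlt
      rw [pvGetD _ _ hi] at hc'
      rw [pvGetD _ _ hk] at h
      rw [pvLt_trans this hc'] at h
      exact Bool.true_eq_false.mp h
  intro fuel
  induction fuel with
  | zero =>
    intro lo hi h0 h1 h2 hlow hhigh
    have heq : hi = lo := by omega
    rw [pvBisect]
    simp only [heq, lt_irrefl, dite_false]
    exact ⟨le_refl _, by omega, hlow, fun i hi1 hi2 => hhigh i (by omega) hi2⟩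
  | succ fuel ih =>
    intro lo hi h0 h1 h2 hlow hhigh
    rw [pvBisect]
    by_cases hlt : lo < hi
    · simp only [dif_pos hlt]
      by_cases hmid : pvLt (rest.getD ((lo + hi) / 2) (0, 0)) nw = true
      · rw [if_pos hmid]
        refine (ih ((lo + hi) / 2 + 1) hi (by omega) (by omega) h2 ?_ hhigh).imp (by omega) id
        intro i hilo
        rcases Nat.lt_or_ge i lo with h | h
        · exact hlow i h
        · exact hmono_lt i ((lo + hi) / 2) (by omega) (by omega) hmid
      · rw [if_neg hmid]
        have hmid' : pvLt (rest.getD ((lo + hi) / 2) (0, 0)) nw = false := by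
          cases h' : pvLt (rest.getD ((lo + hi) / 2) (0, 0)) nw
          · rfl
          · exact absurd h' hmid
        refine (ih lo ((lo + hi) / 2) (by omega) (by omega) (by omega) hlow ?_).imp id
          (fun h => ⟨by omega, h.2⟩)
        intro i hi1 hi2
        exact hmono_ge ((lo + hi) / 2) i hi1 hi2 hmid'
    · rw [dif_neg hlt]
      have heq : hi = lo := by omega
      exact ⟨le_refl _, by omega, hlow, fun i hi1 hi2 => hhigh i (by omega) hi2⟩

lemma pvBisect_full (rest : List (Int × Int)) (nw : Int × Int)
    (hsorted : rest.Pairwise (fun a b => pvLt a b = true)) :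
    pvBisect rest nw 0 rest.length ≤ rest.length ∧
    (∀ i, i < pvBisect rest nw 0 rest.length → pvLt (rest.getD i (0, 0)) nw = true) ∧
    (∀ i, pvBisect rest nw 0 rest.length ≤ i → i < rest.length →
      pvLt (rest.getD i (0, 0)) nw = false) := by
  have := pvBisect_spec rest nw hsorted rest.length 0 rest.length (by omega) (by omega) le_rfl
    (by intro i h; omega) (by intro i h1 h2; omega)
  exact ⟨this.2.1, this.2.2⟩

lemma insert_perm_cons (rest : List (Int × Int)) (nw : Int × Int) (lo : Nat)
    (hlo : lo ≤ rest.length) : (PySem.List.insert rest (lo : Int) nw).Perm (nw :: rest) := by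
  rw [PySem.List.insert_natCast _ _ _ hlo]
  have := @List.perm_middle _ nw (rest.take lo) (rest.drop lo)
  simpa [List.take_append_drop] using this

lemma insert_pairwise {rest : List (Int × Int)} {nw : Int × Int}
    (hsorted : rest.Pairwise (fun a b => pvLt a b = true))
    (hne : ∀ x ∈ rest, x ≠ nw) :
    (PySem.List.insert rest ((pvBisect rest nw 0 rest.length : Nat) : Int) nw).Pairwise
      (fun a b => pvLt a b = true) := by
  obtain ⟨hle, hbelow, habove⟩ := pvBisect_full rest nw hsorted
  set lo := pvBisect rest nw 0 rest.length with hlo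
  rw [PySem.List.insert_natCast _ _ _ hle]
  have htake : ∀ a ∈ rest.take lo, ∃ i, i < lo ∧ i < rest.length ∧ rest[i]? = some a := by
    intro a ha
    obtain ⟨i, hi, hie⟩ := List.mem_iff_getElem.mp ha
    rw [List.length_take] at hi
    have h1 : i < lo := by omega
    have h2 : i < rest.length := by omega
    rw [List.getElem_take] at hie
    exact ⟨i, h1, h2, by rw [List.getElem?_eq_getElem h2, hie]⟩
  have hdrop : ∀ b ∈ rest.drop lo, ∃ k, lo + k < rest.length ∧ rest[lo + k]? = some b := by
    intro b hb
    obtain ⟨k, hk, hke⟩ := List.mem_iff_getElem.mp hb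
    rw [List.length_drop] at hk
    have h2 : lo + k < rest.length := by omega
    rw [List.getElem_drop] at hke
    exact ⟨k, h2, by rw [List.getElem?_eq_getElem h2, hke]⟩
  rw [List.pairwise_append]
  refine ⟨hsorted.sublist (List.take_sublist lo rest), ?_, ?_⟩
  · rw [List.pairwise_cons]
    refine ⟨?_, hsorted.sublist (List.drop_sublist lo rest)⟩
    intro b hb
    obtain ⟨k, h2, hke⟩ := hdrop b hb
    have hfalse : pvLt b nw = false := by
      have := habove (lo + k) (by omega) h2
      rw [List.getD_eq_getElem?_getD, hke] at this
      simpa using this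
    have hbne : b ≠ nw := hne b (List.mem_of_mem_drop hb)
    rcases pvLt_total_of_ne hbne with h | h
    · rw [h] at hfalse; exact absurd hfalse (by simp)
    · exact h
  · intro a ha b hb
    obtain ⟨i, h1, h2, hie⟩ := htake a ha
    have hatrue : pvLt a nw = true := by
      have := hbelow i h1
      rw [List.getD_eq_getElem?_getD, hie] at this
      simpa using this
    rcases List.mem_cons.mp hb with rfl | hb'
    · exact hatrue
    · obtain ⟨k, h4, hke⟩ := hdrop b hb'
      have := List.pairwise_iff_getElem.mp hsorted i (lo + k) h2 h4 (by omega)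
      have hia : rest[i] = a := by
        have := hie; rw [List.getElem?_eq_getElem h2] at this; exact Option.some.inj this
      have hkb : rest[lo + k] = b := by
        have := hke; rw [List.getElem?_eq_getElem h4] at this; exact Option.some.inj this
      rwa [hia, hkb] at this

lemma getD_set_self {l : List Int} {j : Nat} (hj : j < l.length) (v : Int) :
    (l.set j v).getD j 0 = v := by
  rw [pvGetD _ _ (by simpa using hj), List.getElem_set]
  simp

lemma eraseIdx_pvPairsOf_set {sizes : List Int} {j : Nat} (hj : j < sizes.length) (v : Int) :
    (pvPairsOf (sizes.set j v)).eraseIdx j = (pvPairsOf sizes).eraseIdx j := by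
  have hlen : (pvPairsOf (sizes.set j v)).length = sizes.length := by simp [length_pvPairsOf]
  have hlen2 : (pvPairsOf sizes).length = sizes.length := length_pvPairsOf sizes
  apply List.ext_getElem
  · simp [List.length_eraseIdx, hlen, hlen2]
  · intro i h1 h2
    have hi' : i < sizes.length - 1 := by
      rw [List.length_eraseIdx, hlen] at h1
      simpa [hj] using h1
    rw [List.getElem_eraseIdx, List.getElem_eraseIdx]
    split
    · next h =>
      have hil : i < sizes.length := by omega
      rw [getElem_pvPairsOf _ _ (by rw [hlen]; omega), getElem_pvPairsOf _ _ (by rw [hlen2]; omega)]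
      have hji : j ≠ i := by omega
      rw [Prod.mk.injEq]
      refine ⟨?_, rfl⟩
      rw [pvGetD _ _ (by simpa using hil), pvGetD _ _ hil, List.getElem_set]
      simp [hji]
    · next h =>
      have hil : i + 1 < sizes.length := by omega
      rw [getElem_pvPairsOf _ _ (by rw [hlen]; omega), getElem_pvPairsOf _ _ (by rw [hlen2]; omega)]
      have hji : j ≠ i + 1 := by omega
      rw [Prod.mk.injEq]
      refine ⟨?_, rfl⟩
      rw [pvGetD _ _ (by simpa using hil), pvGetD _ _ hil, List.getElem_set]
      simp [hji]

lemma snd_ne_of_mem_erase {sizes : List Int} {j : Nat} {x : Int × Int}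
    (hx : x ∈ (pvPairsOf sizes).eraseIdx j) : x.2 ≠ (j : Int) := by
  rw [List.eraseIdx_eq_take_drop_succ] at hx
  rcases List.mem_append.mp hx with h | h
  · obtain ⟨i, hi, hie⟩ := List.mem_iff_getElem.mp h
    have h1 : i < j := by simp at hi; omega
    have h2 : i < (pvPairsOf sizes).length := by simp at hi; omega
    rw [List.getElem_take, getElem_pvPairsOf _ _ h2] at hie
    rw [← hie]
    simp only [ne_eq, Int.natCast_inj]
    omega
  · obtain ⟨k, hk, hke⟩ := List.mem_iff_getElem.mp h
    have h2 : j + 1 + k < (pvPairsOf sizes).length := by simp at hk; omega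
    rw [List.getElem_drop, getElem_pvPairsOf _ _ h2] at hke
    rw [← hke]
    simp only [ne_eq, Int.natCast_inj]
    omega

lemma loop_eq (L : List (String × List Int)) :
    ∀ (groups : List (List Int)) (sizes : List Int) (pairs : List (Int × Int)),
      sizes ≠ [] → pairs.Perm (pvPairsOf sizes) →
      pairs.Pairwise (fun a b => pvLt a b = true) →
      (L.foldl pvStepA (groups, sizes)).1 = (L.foldl pvStepB (groups, pairs)).1 := by
  induction L with
  | nil => intro groups sizes pairs _ _ _; rfl
  | cons hd tl ih =>
    intro groups sizes pairs hne hperm hsort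
    obtain ⟨p, rest, rfl⟩ : ∃ p rest, pairs = p :: rest := by
      cases pairs with
      | nil =>
        exfalso
        have := hperm.length_eq
        simp [length_pvPairsOf] at this
        exact hne (List.length_eq_zero_iff.mp this.symm)
      | cons p rest => exact ⟨p, rest, rfl⟩
    obtain ⟨m, t⟩ := p
    obtain ⟨j, hjt, hj, hv, hmin?, hidx?, hrest⟩ := head_facts hperm hsort
    have hrestsort : rest.Pairwise (fun a b => pvLt a b = true) := hsort.of_cons
    simp only [List.foldl_cons]
    have hstepA : pvStepA (groups, sizes) hd =
        (groups.set j (groups.getD j [] ++ hd.2), sizes.set j (sizes.getD j 0 + hd.2.length)) := by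
      simp only [pvStepA, hmin?, hidx?]
    have htn : t.toNat = j := by rw [← hjt, Int.toNat_natCast]
    have hstepB : pvStepB (groups, (m, t) :: rest) hd =
        (groups.set j (groups.getD j [] ++ hd.2),
          PySem.List.insert rest ((pvBisect rest (m + (hd.2.length : Int), t) 0 rest.length : Nat) : Int)
            (m + (hd.2.length : Int), t)) := by
      simp only [pvStepB, htn]
    rw [hstepA, hstepB]
    set nw : Int × Int := (m + (hd.2.length : Int), t) with hnw
    set lo : Nat := pvBisect rest nw 0 rest.length with hlodef
    have hnemem : ∀ x ∈ rest, x ≠ nw := by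
      intro x hx hxe
      have := snd_ne_of_mem_erase (hrest.mem_iff.mp hx)
      rw [hxe, hnw, hjt] at this
      exact this rfl
    obtain ⟨hle, _, _⟩ := pvBisect_full rest nw hrestsort
    apply ih
    · intro hcon
      apply hne
      have hl : sizes.length = 0 := by
        have := congrArg List.length hcon
        simpa using this
      exact List.length_eq_zero_iff.mp hl
    · -- permutation is preserved
      have h1 : (PySem.List.insert rest (lo : Int) nw).Perm (nw :: rest) :=
        insert_perm_cons rest nw lo hle
      have h2 : (nw :: rest).Perm (nw :: (pvPairsOf sizes).eraseIdx j) := hrest.cons nw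
      have hj' : j < (sizes.set j (sizes.getD j 0 + hd.2.length)).length := by simpa using hj
      have h3 : pvPairsOf (sizes.set j (sizes.getD j 0 + hd.2.length)) =
          (pvPairsOf (sizes.set j (sizes.getD j 0 + hd.2.length))).take j ++
            ((sizes.set j (sizes.getD j 0 + hd.2.length)).getD j 0, (j : Int)) ::
            (pvPairsOf (sizes.set j (sizes.getD j 0 + hd.2.length))).drop (j + 1) :=
        pvPairsOf_split hj'
      have h4 : (pvPairsOf (sizes.set j (sizes.getD j 0 + hd.2.length))).Perm
          (nw :: (pvPairsOf sizes).eraseIdx j) := by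
        rw [h3, getD_set_self hj, hv, hjt]
        refine List.perm_middle.trans ?_
        rw [← List.eraseIdx_eq_take_drop_succ, eraseIdx_pvPairsOf_set hj]
      exact (h1.trans h2).trans h4.symm
    · exact insert_pairwise hrestsort hnemem

theorem pad_groups_spec : Claim_equal_pad_groups := by
  intro category_to_users num_clients _hdom hpre
  unfold Spec_pad_groups pad_groups pad_groups_alt
  by_cases hord : PySem.List.sorted (PySem.Dict.ofList category_to_users).items
      (fun item => (item.2.length : Int)) true = []
  · rw [hord]
    rfl
  · have hc : category_to_users ≠ [] := by
      intro hcnil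
      apply hord
      rw [PySem.List.sorted_eq_nil_iff, hcnil]
      rfl
    have hn : 1 ≤ num_clients := hpre.resolve_left hc
    have hne : List.replicate num_clients.toNat (0 : Int) ≠ [] := by
      have : num_clients.toNat ≠ 0 := by omega
      simp [this]
    have hinit : ((PySem.List.pyRange 0 num_clients 1).map (fun i => ((0 : Int), i))) =
        pvPairsOf (List.replicate num_clients.toNat (0 : Int)) := by
      rw [PySem.List.pyRange_one]
      simp only [pvPairsOf, List.length_replicate, List.map_map, Int.sub_zero]
      apply List.map_congr_left
      intro k _
      simp [Function.comp, List.getD_eq_getElem?_getD, List.getElem?_replicate]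
      split <;> rfl
    rw [hinit]
    apply loop_eq _ _ _ _ hne (List.Perm.refl _)
    rw [← hinit]
    rw [PySem.List.pyRange_one]
    simp only [List.map_map]
    refine List.Pairwise.map _ ?_ List.pairwise_lt_range
    intro a b hab
    show pvLt (0, 0 + (a : Int)) (0, 0 + (b : Int)) = true
    simp only [pvLt, Bool.or_eq_true, Bool.and_eq_true, decide_eq_true_eq, beq_iff_eq]
    right
    refine ⟨by trivial, ?_⟩
    show (0 : Int) + a < 0 + b
    omega
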